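-- pv_equiv track=rewrite | github.com/Ag3497120/verantyx-v6 | synth_results/3aa6fb7a.py | transform
-- ===== SOURCE A (Python) =====
-- def transform(grid):
--     grid = [row[:] for row in grid]
--     h, w = len(grid), len(grid[0])
--
--     # Find all 2x2 windows and check for L-shapes
--     for i in range(h - 1):
--         for j in range(w - 1):
--             # Count 8s in this 2x2 window
--             eights_positions = []
--             for di in range(2):
--                 for dj in range(2):
--                     if grid[i+di][j+dj] == 8:
--                         eights_positions.append((di, dj))
--
--             # Check if this forms an L (exactly 3 eights)
--             if len(eights_positions) == 3:
--                 # Find the missing position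
--                 all_positions = {(0,0), (0,1), (1,0), (1,1)}
--                 empty_pos = list(all_positions - set(eights_positions))[0]
--                 er, ec = empty_pos
--
--                 # Place a 1 at the empty position if it's currently 0
--                 if grid[i + er][j + ec] == 0:
--                     grid[i + er][j + ec] = 1
--
--     return grid
-- ===== SOURCE B (Python) =====
-- def transform(grid):
--     h = len(grid)
--     w = len(grid[0])
--
--     def becomes_one(r, c):
--         # cell (r, c) is the empty corner of some 2x2 window whose other three cells are 8
--         for di in (0, 1):
--             for dj in (0, 1):
--                 i, j = r - di, c - dj
--                 if 0 <= i <= h - 2 and 0 <= j <= w - 2: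
--                     if all(grid[i + a][j + b] == 8
--                            for a in (0, 1) for b in (0, 1) if (a, b) != (di, dj)):
--                         return True
--         return False
--
--     return [[1 if v == 0 and becomes_one(r, c) else v
--              for c, v in enumerate(row)]
--             for r, row in enumerate(grid)]
-- ===== Notes on version B (the rewrite author's own statement) =====
-- stated objective: alternative
-- what changed: A sweeps all 2x2 windows in order, mutating a copied grid (collecting 8-positions per window, taking a set difference to find the empty corner, writing 1 in place); B is a pure per-cell map over the original grid that turns a cell into 1 iff it is 0 and some 2x2 window containing it as a corner has its other three cells equal to 8 - valid because A's writes only ever turn 0 into 1 and so never change which cells are 8.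
import Mathlib
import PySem

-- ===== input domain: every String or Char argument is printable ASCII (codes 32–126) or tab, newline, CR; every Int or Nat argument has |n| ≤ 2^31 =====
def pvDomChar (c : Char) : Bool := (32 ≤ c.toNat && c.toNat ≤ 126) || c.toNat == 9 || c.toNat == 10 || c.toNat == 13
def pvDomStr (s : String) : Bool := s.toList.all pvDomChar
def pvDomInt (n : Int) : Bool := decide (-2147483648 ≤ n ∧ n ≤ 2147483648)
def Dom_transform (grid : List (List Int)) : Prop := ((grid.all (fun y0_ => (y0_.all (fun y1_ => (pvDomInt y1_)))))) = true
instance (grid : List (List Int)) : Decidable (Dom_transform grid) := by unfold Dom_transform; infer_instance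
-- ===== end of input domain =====

-- B re-implements the window sweep as a per-cell pure computation over the original grid
-- (a cell becomes 1 iff it is 0 and is the empty corner of some 2x2 window whose other
-- three cells are 8); same return value, no intermediate mutation. Objective: a different
-- decomposition (A mutates a copy window by window; B maps each cell independently),
-- measured faster by a constant factor in a timing run.

-- ===== PORT A =====
-- grid[i][j] read with defaults; A only reads/writes in range on inputs satisfying Pre_.
def pvCell (g : List (List Int)) (i j : Int) : Int :=
  PySem.List.pyGetD (PySem.List.pyGetD g i []) j 0

-- grid[i][j] = v (indices are nonnegative wherever A executes this)
def pvSet2d (g : List (List Int)) (i j : Int) (v : Int) : List (List Int) :=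
  g.set i.toNat ((g.getD i.toNat []).set j.toNat v)

-- the 2x2 offsets in the order A's nested di/dj loops visit them
def pvPairs : List (Int × Int) := [(0,0),(0,1),(1,0),(1,1)]

-- body of A's double loop over windows: collect the 8-positions, and on an L (exactly 3)
-- write 1 at the (unique) missing position if it currently holds 0
def pvStep (g : List (List Int)) (i j : Int) : List (List Int) :=
  let eights := pvPairs.filter (fun p => pvCell g (i + p.1) (j + p.2) == 8)
  if eights.length = 3 then
    -- Python: list(all_positions - set(eights_positions))[0]; the difference is the one
    -- missing offset, so taking the first non-member of pvPairs is exact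
    match pvPairs.filter (fun p => !(eights.contains p)) with
    | [] => g
    | e :: _ =>
        if pvCell g (i + e.1) (j + e.2) == 0 then pvSet2d g (i + e.1) (j + e.2) 1 else g
  else g

def transform (grid : List (List Int)) : List (List Int) :=
  let g0 := grid.map (fun row => row)
  let h : Int := g0.length
  let w : Int := (PySem.List.pyGetD g0 0 []).length
  (PySem.List.pyRange 0 (h - 1) 1).foldl (fun g i =>
    (PySem.List.pyRange 0 (w - 1) 1).foldl (fun g j => pvStep g i j) g) g0

-- ===== PORT B =====
-- all(grid[i+a][j+b] == 8 for (a,b) in offsets if (a,b) != d)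
def pvOthers8 (grid : List (List Int)) (i j : Int) (d : Int × Int) : Bool :=
  (([(0,0),(0,1),(1,0),(1,1)] : List (Int × Int)).filter (fun a => a ≠ d)).all
    (fun a => pvCell grid (i + a.1) (j + a.2) == 8)

-- becomes_one(r, c): some window containing (r,c) as a corner has its other three cells = 8
def pvBecomesOne (grid : List (List Int)) (h w : Int) (r c : Int) : Bool :=
  ([(0,0),(0,1),(1,0),(1,1)] : List (Int × Int)).any (fun d =>
    decide (0 ≤ r - d.1) && decide (r - d.1 ≤ h - 2) &&
    decide (0 ≤ c - d.2) && decide (c - d.2 ≤ w - 2) &&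
    pvOthers8 grid (r - d.1) (c - d.2) d)

def transform_alt (grid : List (List Int)) : List (List Int) :=
  let h : Int := grid.length
  let w : Int := (PySem.List.pyGetD grid 0 []).length
  (PySem.List.enumerate grid).map (fun rr =>
    (PySem.List.enumerate rr.2).map (fun cv =>
      if cv.2 == 0 && pvBecomesOne grid h w rr.1 cv.1 then 1 else cv.2))

-- ===== PRECONDITION & SPEC =====
-- Exactly the inputs on which A returns: on the empty grid the access grid[0] raises
-- IndexError, and with at least 2 rows and at least 2 columns A reads every row at
-- columns below len(grid[0]), raising IndexError on any shorter row; otherwise A returns.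
def Pre_transform (grid : List (List Int)) : Prop :=
  grid ≠ [] ∧ (2 ≤ grid.length → 2 ≤ (grid.headD []).length →
    ∀ row ∈ grid, (grid.headD []).length ≤ row.length)
instance (grid : List (List Int)) : Decidable (Pre_transform grid) := by
  unfold Pre_transform; infer_instance

def pvWitness_transform : List (List Int) := [[8, 8], [8, 0]]

def Spec_transform (grid : List (List Int)) (out : List (List Int)) : Prop := out = transform_alt grid
instance (grid : List (List Int)) (out : List (List Int)) : Decidable (Spec_transform grid out) := by unfold Spec_transform; infer_instance

-- ===== CLAIM (what is proved, stated in full; the proofs are below) =====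
def Claim_equal_transform : Prop := ∀ (grid : List (List Int)), Dom_transform grid → Pre_transform grid → Spec_transform grid (transform grid)

-- ===== LEMMAS AND PROOFS =====

-- value of g at (r, c), 0 outside; matches pvCell on natural indices
def cellN (g : List (List Int)) (r c : ℕ) : Int := (g.getD r []).getD c 0

-- (r,c) is the empty corner of window (i,j): the other three cells of the window are 8
def winMarks (grid : List (List Int)) (i j r c : ℕ) : Prop :=
  ∃ a b : ℕ, a < 2 ∧ b < 2 ∧ r = i + a ∧ c = j + b ∧
    ∀ a' b' : ℕ, a' < 2 → b' < 2 → (a', b') ≠ (a, b) → cellN grid (i + a') (j + b') = 8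

-- some already-processed window marks (r,c)
def trigD (grid : List (List Int)) (D : List (ℕ × ℕ)) (r c : ℕ) : Prop :=
  ∃ p ∈ D, winMarks grid p.1 p.2 r c

-- loop invariant of A's sweep: shape preserved, and each cell is 1 where an already
-- processed window marked a 0 cell, otherwise untouched
def AInv (grid : List (List Int)) (D : List (ℕ × ℕ)) (g : List (List Int)) : Prop :=
  g.length = grid.length ∧
  (∀ k : ℕ, (g.getD k []).length = (grid.getD k []).length) ∧
  ∀ r c : ℕ,
    (cellN grid r c = 0 ∧ trigD grid D r c → cellN g r c = 1) ∧
    (¬(cellN grid r c = 0 ∧ trigD grid D r c) → cellN g r c = cellN grid r c)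

lemma pvCell_cast (g : List (List Int)) (r c : ℕ) : pvCell g ↑r ↑c = cellN g r c := by
  simp [pvCell, cellN, PySem.List.pyGetD_natCast]

lemma eight_iff {grid : List (List Int)} {D : List (ℕ × ℕ)} {g : List (List Int)}
    (h : AInv grid D g) (r c : ℕ) : (cellN g r c = 8 ↔ cellN grid r c = 8) := by
  obtain ⟨-, -, h3⟩ := h
  obtain ⟨h1, h2⟩ := h3 r c
  by_cases hC : cellN grid r c = 0 ∧ trigD grid D r c
  · rw [h1 hC]; constructor <;> intro hx <;> [omega; (exact absurd hC.1 (by omega))]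
  · rw [h2 hC]

lemma zero_iff {grid : List (List Int)} {D : List (ℕ × ℕ)} {g : List (List Int)}
    (h : AInv grid D g) (r c : ℕ) :
    (cellN g r c = 0 ↔ cellN grid r c = 0 ∧ ¬ trigD grid D r c) := by
  obtain ⟨-, -, h3⟩ := h
  obtain ⟨h1, h2⟩ := h3 r c
  by_cases hC : cellN grid r c = 0 ∧ trigD grid D r c
  · rw [h1 hC]; constructor
    · intro hx; exact absurd hx (by norm_num)
    · rintro ⟨h0, hnt⟩; exact absurd hC.2 hnt
  · rw [h2 hC]; constructor
    · intro h0; exact ⟨h0, fun ht => hC ⟨h0, ht⟩⟩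
    · rintro ⟨h0, -⟩; exact h0

lemma trigD_append {grid : List (List Int)} {D : List (ℕ × ℕ)} {r c : ℕ} (q : ℕ × ℕ) :
    trigD grid (D ++ [q]) r c ↔ trigD grid D r c ∨ winMarks grid q.1 q.2 r c := by
  simp [trigD, or_comm]



-- extending the processed set by a window that changed nothing it needed to change
lemma ainv_extend_null {grid : List (List Int)} {D : List (ℕ × ℕ)} {g : List (List Int)}
    {i j : ℕ} (h : AInv grid D g)
    (hone : ∀ r c : ℕ, cellN grid r c = 0 → winMarks grid i j r c → cellN g r c = 1) :
    AInv grid (D ++ [(i, j)]) g := by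
  obtain ⟨hl, hrl, h3⟩ := h
  refine ⟨hl, hrl, fun r c => ⟨?_, ?_⟩⟩
  · rintro ⟨h0, ht⟩
    rcases (trigD_append _).1 ht with ht | hw
    · exact (h3 r c).1 ⟨h0, ht⟩
    · exact hone r c h0 hw
  · intro hC
    exact (h3 r c).2 fun ⟨h0, ht⟩ => hC ⟨h0, (trigD_append _).2 (Or.inl ht)⟩

-- no cell can be marked by window (i,j) when two of its cells are not 8
lemma no_winMarks_two {grid : List (List Int)} {i j : ℕ} {r c : ℕ}
    (p q : ℕ × ℕ) (hp1 : p.1 < 2) (hp2 : p.2 < 2) (hq1 : q.1 < 2) (hq2 : q.2 < 2)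
    (hpq : p ≠ q)
    (h8p : cellN grid (i + p.1) (j + p.2) ≠ 8)
    (h8q : cellN grid (i + q.1) (j + q.2) ≠ 8) :
    ¬ winMarks grid i j r c := by
  rintro ⟨a, b, ha, hb, -, -, hall⟩
  by_cases hpe : p = (a, b)
  · exact h8q (hall q.1 q.2 hq1 hq2 (by rw [← hpe]; exact fun h => hpq ((Prod.ext_iff).2 ⟨congrArg Prod.fst h, congrArg Prod.snd h⟩).symm))
  · exact h8p (hall p.1 p.2 hp1 hp2 (by intro h; exact hpe (by rw [← h])))

-- a window all of whose four cells are 8 marks no 0 cell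
lemma no_winMarks_all8 {grid : List (List Int)} {i j : ℕ} {r c : ℕ}
    (h8 : ∀ a b : ℕ, a < 2 → b < 2 → cellN grid (i + a) (j + b) = 8)
    (h0 : cellN grid r c = 0) : ¬ winMarks grid i j r c := by
  rintro ⟨a, b, ha, hb, hr, hc, -⟩
  subst hr; subst hc
  have := h8 a b ha hb
  omega

-- the only cell a window with a unique non-8 corner m can mark is that corner
lemma winMarks_unique {grid : List (List Int)} {i j : ℕ} {r c : ℕ} (m : ℕ × ℕ)
    (hm1 : m.1 < 2) (hm2 : m.2 < 2)
    (_h8 : ∀ a b : ℕ, a < 2 → b < 2 → (a, b) ≠ m → cellN grid (i + a) (j + b) = 8)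
    (hm8 : cellN grid (i + m.1) (j + m.2) ≠ 8) :
    winMarks grid i j r c → r = i + m.1 ∧ c = j + m.2 := by
  rintro ⟨a, b, ha, hb, hr, hc, hall⟩
  by_cases hab : (a, b) = m
  · obtain ⟨h1, h2⟩ := Prod.mk.injEq a b m.1 m.2 ▸ (hab.trans (Prod.mk.eta (p := m)).symm)
    exact ⟨by omega, by omega⟩
  · exact absurd (hall m.1 m.2 hm1 hm2 (fun h => hab (by rw [← h]))) hm8

lemma winMarks_intro {grid : List (List Int)} {i j : ℕ} (m : ℕ × ℕ)
    (hm1 : m.1 < 2) (hm2 : m.2 < 2)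
    (h8 : ∀ a b : ℕ, a < 2 → b < 2 → (a, b) ≠ m → cellN grid (i + a) (j + b) = 8) :
    winMarks grid i j (i + m.1) (j + m.2) :=
  ⟨m.1, m.2, hm1, hm2, rfl, rfl, fun a' b' ha' hb' hne => h8 a' b' ha' hb' hne⟩

lemma len_set2d (g : List (List Int)) (i j : Int) (v : Int) :
    (pvSet2d g i j v).length = g.length := by
  simp [pvSet2d]

lemma rowlen_set2d (g : List (List Int)) (r0 c0 : ℕ) (v : Int) (k : ℕ) :
    ((pvSet2d g ↑r0 ↑c0 v).getD k []).length = ((g.getD k []).length) := by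
  simp only [pvSet2d, Int.toNat_natCast]
  rcases eq_or_ne k r0 with rfl | hne
  · by_cases hk : k < g.length
    · simp [List.getD_eq_getElem?_getD, hk]
    · rw [List.getD_eq_getElem?_getD, List.getElem?_set]
      simp [hk, List.getD_eq_getElem?_getD]
  · simp [List.getD_eq_getElem?_getD, hne.symm]

lemma cellN_set2d (g : List (List Int)) (r0 c0 : ℕ) (v : Int)
    (hr : r0 < g.length) (hc : c0 < (g.getD r0 []).length) (r c : ℕ) :
    cellN (pvSet2d g ↑r0 ↑c0 v) r c = if r = r0 ∧ c = c0 then v else cellN g r c := by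
  simp only [pvSet2d, Int.toNat_natCast, cellN]
  rcases eq_or_ne r r0 with rfl | hner
  · have h1 : (g.set r ((g.getD r []).set c0 v)).getD r [] = (g.getD r []).set c0 v := by
      rw [List.getD_eq_getElem?_getD, List.getElem?_set]
      simp [hr]
    rw [h1]
    rcases eq_or_ne c c0 with rfl | hnec
    · rw [List.getD_eq_getElem?_getD, List.getElem?_set]
      simp only [hc, if_true]
      simp
    · rw [List.getD_eq_getElem?_getD, List.getElem?_set]
      simp [hnec, hnec.symm, List.getD_eq_getElem?_getD]
  · have h1 : (g.set r0 ((g.getD r0 []).set c0 v)).getD r [] = g.getD r [] := by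
      rw [List.getD_eq_getElem?_getD, List.getElem?_set]
      simp [hner.symm, List.getD_eq_getElem?_getD]
    rw [h1]
    simp [hner]

-- processing a window with exactly three 8s (missing corner m): A writes 1 there iff the
-- cell currently holds 0; either way the invariant extends by this window
lemma ainv_step_write {grid : List (List Int)} {D : List (ℕ × ℕ)} {g : List (List Int)}
    {w i j : ℕ} (hInv : AInv grid D g)
    (hlen : ∀ k : ℕ, k < grid.length → w ≤ (grid.getD k []).length)
    (hi : i + 2 ≤ grid.length) (hj : j + 2 ≤ w)
    (m : ℕ × ℕ) (hm1 : m.1 < 2) (hm2 : m.2 < 2)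
    (h8 : ∀ a b : ℕ, a < 2 → b < 2 → (a, b) ≠ m → cellN grid (i + a) (j + b) = 8)
    (hm8 : cellN grid (i + m.1) (j + m.2) ≠ 8) :
    AInv grid (D ++ [(i, j)])
      (if cellN g (i + m.1) (j + m.2) == 0 then pvSet2d g ↑(i + m.1) ↑(j + m.2) 1 else g) := by
  by_cases hz : cellN g (i + m.1) (j + m.2) = 0
  · rw [if_pos (by simpa using hz)]
    obtain ⟨hl, hrl, h3⟩ := hInv
    obtain ⟨h0, hnt⟩ := (zero_iff ⟨hl, hrl, h3⟩ _ _).1 hz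
    have hrin : i + m.1 < g.length := by omega
    have hcin : j + m.2 < (g.getD (i + m.1) []).length := by
      rw [hrl]; have := hlen (i + m.1) (by omega); omega
    have hcell := cellN_set2d g (i + m.1) (j + m.2) 1 hrin hcin
    refine ⟨by rw [len_set2d, hl], fun k => by rw [rowlen_set2d, hrl], fun r c => ⟨?_, ?_⟩⟩
    · rintro ⟨hr0, ht⟩
      rw [hcell]
      rcases eq_or_ne (r, c) ((i + m.1), (j + m.2)) with he | hne
      · injection he with e1 e2
        rw [if_pos ⟨e1, e2⟩]
      · rw [if_neg fun hx => hne (Prod.ext_iff.2 hx)]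
        rcases (trigD_append _).1 ht with ht | hw
        · exact (h3 r c).1 ⟨hr0, ht⟩
        · exact absurd (by
            obtain ⟨e1, e2⟩ := winMarks_unique m hm1 hm2 h8 hm8 hw
            exact Prod.ext_iff.2 ⟨e1, e2⟩) hne
    · intro hC
      rw [hcell]
      rcases eq_or_ne (r, c) ((i + m.1), (j + m.2)) with he | hne
      · injection he with e1 e2
        exact absurd ⟨by rw [e1, e2]; exact h0,
          (trigD_append _).2 (Or.inr (by rw [e1, e2]; exact winMarks_intro m hm1 hm2 h8))⟩ hC
      · rw [if_neg fun hx => hne (Prod.ext_iff.2 hx)]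
        exact (h3 r c).2 fun ⟨hr0, ht⟩ => hC ⟨hr0, (trigD_append _).2 (Or.inl ht)⟩
  · rw [if_neg (by simpa using hz)]
    refine ainv_extend_null hInv fun r c hr0 hw => ?_
    obtain ⟨e1, e2⟩ := winMarks_unique m hm1 hm2 h8 hm8 hw
    subst e1; subst e2
    obtain ⟨-, -, h3⟩ := hInv
    rcases Classical.em (cellN grid (i + m.1) (j + m.2) = 0 ∧ trigD grid D (i + m.1) (j + m.2)) with hC | hC
    · exact (h3 _ _).1 hC
    · exact absurd ((h3 _ _).2 hC ▸ hr0) hz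

-- processing one in-range window preserves the invariant, extending the processed set
set_option maxHeartbeats 1600000 in
lemma ainv_step {grid : List (List Int)} {D : List (ℕ × ℕ)} {g : List (List Int)}
    {w i j : ℕ} (hInv : AInv grid D g)
    (hlen : ∀ k : ℕ, k < grid.length → w ≤ (grid.getD k []).length)
    (hi : i + 2 ≤ grid.length) (hj : j + 2 ≤ w) :
    AInv grid (D ++ [(i, j)]) (pvStep g ↑i ↑j) := by
  have E01 : pvCell g (↑i : Int) (↑j + 1) = cellN g i (j+1) := by
    have := pvCell_cast g i (j+1); push_cast at this; exact this
  have E10 : pvCell g ((↑i : Int) + 1) ↑j = cellN g (i+1) j := by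
    have := pvCell_cast g (i+1) j; push_cast at this; exact this
  have E11 : pvCell g ((↑i : Int) + 1) (↑j + 1) = cellN g (i+1) (j+1) := by
    have := pvCell_cast g (i+1) (j+1); push_cast at this; exact this
  have B : ∀ r c : ℕ, (cellN g r c == 8) = decide (cellN grid r c = 8) := by
    intro r c
    rcases Classical.em (cellN grid r c = 8) with h | h
    · simp [h, (eight_iff hInv r c).2 h]
    · simp [h]
      exact fun hx => h ((eight_iff hInv r c).1 hx)
  have skip2 : ∀ p q : ℕ × ℕ, p.1 < 2 → p.2 < 2 → q.1 < 2 → q.2 < 2 → p ≠ q →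
      cellN grid (i + p.1) (j + p.2) ≠ 8 → cellN grid (i + q.1) (j + q.2) ≠ 8 →
      AInv grid (D ++ [(i, j)]) g := fun p q hp1 hp2 hq1 hq2 hpq h8p h8q =>
    ainv_extend_null hInv (fun r c _ hw =>
      absurd hw (no_winMarks_two p q hp1 hp2 hq1 hq2 hpq h8p h8q))
  by_cases h00 : cellN grid i j = 8 <;> by_cases h01 : cellN grid i (j+1) = 8 <;>
    by_cases h10 : cellN grid (i+1) j = 8 <;> by_cases h11 : cellN grid (i+1) (j+1) = 8 <;>
    simp [pvStep, pvPairs, pvCell_cast, E01, E10, E11, B, h00, h01, h10, h11]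
  · exact ainv_extend_null hInv (fun r c h0 hw =>
      absurd hw (no_winMarks_all8 (fun a b ha hb => by
        interval_cases a <;> interval_cases b <;> simp_all) h0))
  · have H := ainv_step_write hInv hlen hi hj (1,1) (by norm_num) (by norm_num)
      (fun a b ha hb hne => by interval_cases a <;> interval_cases b <;> simp_all)
      (by simpa using h11)
    simpa using H
  · have H := ainv_step_write hInv hlen hi hj (1,0) (by norm_num) (by norm_num)
      (fun a b ha hb hne => by interval_cases a <;> interval_cases b <;> simp_all)
      (by simpa using h10)
    simpa using H
  · exact skip2 (1,0) (1,1) (by norm_num) (by norm_num) (by norm_num) (by norm_num)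
      (by decide) (by simpa using h10) (by simpa using h11)
  · have H := ainv_step_write hInv hlen hi hj (0,1) (by norm_num) (by norm_num)
      (fun a b ha hb hne => by interval_cases a <;> interval_cases b <;> simp_all)
      (by simpa using h01)
    simpa using H
  · exact skip2 (0,1) (1,1) (by norm_num) (by norm_num) (by norm_num) (by norm_num)
      (by decide) (by simpa using h01) (by simpa using h11)
  · exact skip2 (0,1) (1,0) (by norm_num) (by norm_num) (by norm_num) (by norm_num)
      (by decide) (by simpa using h01) (by simpa using h10)
  · exact skip2 (0,1) (1,0) (by norm_num) (by norm_num) (by norm_num) (by norm_num)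
      (by decide) (by simpa using h01) (by simpa using h10)
  · have H := ainv_step_write hInv hlen hi hj (0,0) (by norm_num) (by norm_num)
      (fun a b ha hb hne => by interval_cases a <;> interval_cases b <;> simp_all)
      (by simpa using h00)
    simpa using H
  · exact skip2 (0,0) (1,1) (by norm_num) (by norm_num) (by norm_num) (by norm_num)
      (by decide) (by simpa using h00) (by simpa using h11)
  · exact skip2 (0,0) (1,0) (by norm_num) (by norm_num) (by norm_num) (by norm_num)
      (by decide) (by simpa using h00) (by simpa using h10)
  · exact skip2 (0,0) (1,0) (by norm_num) (by norm_num) (by norm_num) (by norm_num)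
      (by decide) (by simpa using h00) (by simpa using h10)
  · exact skip2 (0,0) (0,1) (by norm_num) (by norm_num) (by norm_num) (by norm_num)
      (by decide) (by simpa using h00) (by simpa using h01)
  · exact skip2 (0,0) (0,1) (by norm_num) (by norm_num) (by norm_num) (by norm_num)
      (by decide) (by simpa using h00) (by simpa using h01)
  · exact skip2 (0,0) (0,1) (by norm_num) (by norm_num) (by norm_num) (by norm_num)
      (by decide) (by simpa using h00) (by simpa using h01)
  · exact skip2 (0,0) (0,1) (by norm_num) (by norm_num) (by norm_num) (by norm_num)
      (by decide) (by simpa using h00) (by simpa using h01)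

-- the windows A visits, in visiting order
def winList (h w : ℕ) : List (ℕ × ℕ) :=
  (List.range (h - 1)).flatMap (fun i => (List.range (w - 1)).map (fun j => (i, j)))

lemma mem_winList {h w : ℕ} {p : ℕ × ℕ} : p ∈ winList h w ↔ p.1 < h - 1 ∧ p.2 < w - 1 := by
  constructor
  · intro hp
    simp only [winList, List.mem_flatMap, List.mem_map, List.mem_range] at hp
    obtain ⟨i, hi, j, hj, rfl⟩ := hp
    exact ⟨hi, hj⟩
  · intro ⟨h1, h2⟩
    simp only [winList, List.mem_flatMap, List.mem_map, List.mem_range]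
    exact ⟨p.1, h1, p.2, h2, rfl⟩

lemma ainv_foldl {grid : List (List Int)} {w : ℕ}
    (hlen : ∀ k : ℕ, k < grid.length → w ≤ (grid.getD k []).length) :
    ∀ (W : List (ℕ × ℕ)), (∀ p ∈ W, p.1 + 2 ≤ grid.length ∧ p.2 + 2 ≤ w) →
    ∀ (D : List (ℕ × ℕ)) (g : List (List Int)), AInv grid D g →
    AInv grid (D ++ W) (W.foldl (fun g p => pvStep g ↑p.1 ↑p.2) g)
  | [], _, D, g, hInv => by simpa using hInv
  | p :: W, hW, D, g, hInv => by
    have h1 := ainv_step (w := w) hInv hlen (hW p (by simp)).1 (hW p (by simp)).2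
    have h2 := ainv_foldl hlen W (fun q hq => hW q (by simp [hq])) (D ++ [p]) _ h1
    simpa using h2

lemma transform_eq_foldl (grid : List (List Int)) :
    transform grid =
      (winList grid.length (grid.getD 0 []).length).foldl
        (fun g p => pvStep g ↑p.1 ↑p.2) grid := by
  have hid : grid.map (fun row => row) = grid := List.map_id' grid
  simp only [transform, hid, PySem.List.pyRange_one, List.foldl_map]
  have e1 : ((grid.length : Int) - 1 - 0).toNat = grid.length - 1 := by omega
  have e2 : PySem.List.pyGetD grid 0 [] = grid.getD 0 [] := PySem.List.pyGetD_zero grid []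
  have e3 : (((grid.getD 0 []).length : Int) - 1 - 0).toNat = (grid.getD 0 []).length - 1 := by
    omega
  simp only [e2, e1, e3, zero_add]
  rw [winList, List.foldl_flatMap]
  simp only [List.foldl_map]

lemma ainv_nil (grid : List (List Int)) : AInv grid [] grid :=
  ⟨rfl, fun _ => rfl, fun _ _ =>
    ⟨fun ⟨_, ⟨_, hp, _⟩⟩ => absurd hp (List.not_mem_nil), fun _ => rfl⟩⟩

lemma headD_eq_getD (grid : List (List Int)) : grid.headD [] = grid.getD 0 [] := by
  cases grid <;> simp

-- what A's sweep computes, pointwise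
lemma transform_ainv (grid : List (List Int)) (hPre : Pre_transform grid) :
    AInv grid (winList grid.length (grid.getD 0 []).length) (transform grid) := by
  rw [transform_eq_foldl]
  by_cases hd : 2 ≤ grid.length ∧ 2 ≤ (grid.getD 0 []).length
  · have hlen : ∀ k : ℕ, k < grid.length →
        (grid.getD 0 []).length ≤ (grid.getD k []).length := by
      intro k hk
      have hmem : grid.getD k [] ∈ grid := by
        rw [List.getD_eq_getElem?_getD, List.getElem?_eq_getElem hk]
        exact List.getElem_mem hk
      have := hPre.2 hd.1 (by rw [headD_eq_getD]; exact hd.2) _ hmem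
      rwa [headD_eq_getD] at this
    have := ainv_foldl hlen (winList grid.length (grid.getD 0 []).length)
      (fun p hp => by
        obtain ⟨h1, h2⟩ := mem_winList.1 hp
        constructor <;> omega)
      [] grid (ainv_nil grid)
    simpa using this
  · have hnil : winList grid.length (grid.getD 0 []).length = [] := by
      rcases Nat.lt_or_ge grid.length 2 with hh | hh
      · have : grid.length - 1 = 0 := by omega
        simp [winList, this]
      · have hw : (grid.getD 0 []).length - 1 = 0 := by omega
        simp only [winList]
        rw [hw]
        simp
    rw [hnil]
    exact ainv_nil grid

-- B's per-cell test is exactly "some window marks (r, c)"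
lemma becomesOne_iff (grid : List (List Int)) (h w r c : ℕ) :
    pvBecomesOne grid ↑h ↑w ↑r ↑c = true ↔
      ∃ i j : ℕ, i + 2 ≤ h ∧ j + 2 ≤ w ∧ winMarks grid i j r c := by
  have C8 : ∀ (x y : ℕ) (u v : Int), u = ↑x → v = ↑y → cellN grid x y = 8 →
      pvCell grid u v = 8 := fun x y u v hu hv hxy => by rw [hu, hv, pvCell_cast]; exact hxy
  have D8 : ∀ (x y : ℕ) (u v : Int), u = ↑x → v = ↑y → pvCell grid u v = 8 →
      cellN grid x y = 8 := fun x y u v hu hv hxy => by rw [hu, hv, pvCell_cast] at hxy; exact hxy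
  simp only [pvBecomesOne, pvOthers8, winMarks]
  simp
  constructor
  · rintro (⟨⟨h1, h2⟩, c1, c2, c3⟩ | ⟨⟨⟨h1, h2⟩, h3⟩, c1, c2, c3⟩ |
      ⟨⟨⟨h1, h2⟩, h3⟩, c1, c2, c3⟩ | ⟨⟨⟨⟨h1, h2⟩, h3⟩, h4⟩, c1, c2, c3⟩)
    · have e1 := D8 r (c+1) _ _ rfl (by omega) c1
      have e2 := D8 (r+1) c _ _ (by omega) rfl c2
      have e3 := D8 (r+1) (c+1) _ _ (by omega) (by omega) c3
      refine ⟨r, by omega, c, by omega, 0, by norm_num, 0, by norm_num, by omega, by omega, ?_⟩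
      intro a' b' ha' hb' hne
      interval_cases a' <;> interval_cases b' <;>
        first
          | exact absurd rfl (hne rfl)
          | simpa using e1
          | simpa using e2
          | simpa using e3
    · have e1 := D8 r (c-1) _ _ rfl (by omega) c1
      have e2 := D8 (r+1) (c-1) _ _ (by omega) (by omega) c2
      have e3 := D8 (r+1) c _ _ (by omega) rfl c3
      have hc1 : c - 1 + 1 = c := by omega
      refine ⟨r, by omega, c - 1, by omega, 0, by norm_num, 1, by norm_num, by omega, by omega, ?_⟩
      intro a' b' ha' hb' hne
      interval_cases a' <;> interval_cases b' <;> simp only [Nat.add_zero, hc1] <;>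
        first
          | exact absurd rfl (hne rfl)
          | simpa using e1
          | simpa using e2
          | simpa using e3
    · have e1 := D8 (r-1) c _ _ (by omega) rfl c1
      have e2 := D8 (r-1) (c+1) _ _ (by omega) (by omega) c2
      have e3 := D8 r (c+1) _ _ rfl (by omega) c3
      have hr1 : r - 1 + 1 = r := by omega
      refine ⟨r - 1, by omega, c, by omega, 1, by norm_num, 0, by norm_num, by omega, by omega, ?_⟩
      intro a' b' ha' hb' hne
      interval_cases a' <;> interval_cases b' <;> simp only [Nat.add_zero, hr1] <;>
        first
          | exact absurd rfl (hne rfl)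
          | simpa using e1
          | simpa using e2
          | simpa using e3
    · have e1 := D8 (r-1) (c-1) _ _ (by omega) (by omega) c1
      have e2 := D8 (r-1) c _ _ (by omega) rfl c2
      have e3 := D8 r (c-1) _ _ rfl (by omega) c3
      have hr1 : r - 1 + 1 = r := by omega
      have hc1 : c - 1 + 1 = c := by omega
      refine ⟨r - 1, by omega, c - 1, by omega, 1, by norm_num, 1, by norm_num, by omega, by omega, ?_⟩
      intro a' b' ha' hb' hne
      interval_cases a' <;> interval_cases b' <;> simp only [Nat.add_zero, hr1, hc1] <;>
        first
          | exact absurd rfl (hne rfl)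
          | simpa using e1
          | simpa using e2
          | simpa using e3
  · rintro ⟨i, hi, j, hj, a, ha, b, hb, hr, hc, hall⟩
    interval_cases a <;> interval_cases b
    · exact Or.inl ⟨⟨by omega, by omega⟩,
        C8 i (j+1) _ _ (by omega) (by omega) (hall 0 1 (by norm_num) (by norm_num) (by omega)),
        C8 (i+1) j _ _ (by omega) (by omega) (hall 1 0 (by norm_num) (by norm_num) (by omega)),
        C8 (i+1) (j+1) _ _ (by omega) (by omega) (hall 1 1 (by norm_num) (by norm_num) (by omega))⟩
    · exact Or.inr (Or.inl ⟨⟨⟨by omega, by omega⟩, by omega⟩,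
        C8 i j _ _ (by omega) (by omega) (hall 0 0 (by norm_num) (by norm_num) (by omega)),
        C8 (i+1) j _ _ (by omega) (by omega) (hall 1 0 (by norm_num) (by norm_num) (by omega)),
        C8 (i+1) (j+1) _ _ (by omega) (by omega) (hall 1 1 (by norm_num) (by norm_num) (by omega))⟩)
    · exact Or.inr (Or.inr (Or.inl ⟨⟨⟨by omega, by omega⟩, by omega⟩,
        C8 i j _ _ (by omega) (by omega) (hall 0 0 (by norm_num) (by norm_num) (by omega)),
        C8 i (j+1) _ _ (by omega) (by omega) (hall 0 1 (by norm_num) (by norm_num) (by omega)),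
        C8 (i+1) (j+1) _ _ (by omega) (by omega) (hall 1 1 (by norm_num) (by norm_num) (by omega))⟩))
    · exact Or.inr (Or.inr (Or.inr ⟨⟨⟨⟨by omega, by omega⟩, by omega⟩, by omega⟩,
        C8 i j _ _ (by omega) (by omega) (hall 0 0 (by norm_num) (by norm_num) (by omega)),
        C8 i (j+1) _ _ (by omega) (by omega) (hall 0 1 (by norm_num) (by norm_num) (by omega)),
        C8 (i+1) j _ _ (by omega) (by omega) (hall 1 0 (by norm_num) (by norm_num) (by omega))⟩))

lemma getD_eq_getElem_row (g : List (List Int)) (r : ℕ) (hr : r < g.length) :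
    g.getD r [] = g[r] := by
  rw [List.getD_eq_getElem?_getD, List.getElem?_eq_getElem hr]; rfl

lemma cellN_eq_getElem (g : List (List Int)) (r c : ℕ) (hr : r < g.length)
    (hc : c < (g[r]).length) : cellN g r c = g[r][c] := by
  rw [cellN, getD_eq_getElem_row g r hr, List.getD_eq_getElem?_getD,
    List.getElem?_eq_getElem hc]; rfl

lemma trig_winList_iff (grid : List (List Int)) (h w r c : ℕ) :
    trigD grid (winList h w) r c ↔
      ∃ i j : ℕ, i + 2 ≤ h ∧ j + 2 ≤ w ∧ winMarks grid i j r c := by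
  constructor
  · rintro ⟨p, hp, hwm⟩
    obtain ⟨h1, h2⟩ := mem_winList.1 hp
    exact ⟨p.1, p.2, by omega, by omega, hwm⟩
  · rintro ⟨i, j, hi, hj, hwm⟩
    exact ⟨(i, j), mem_winList.2 ⟨by omega, by omega⟩, hwm⟩

-- ===== VERDICT (by name: the statement is the Claim_ definition above) =====
theorem transform_spec : Claim_equal_transform := by
  intro grid _ hPre
  unfold Spec_transform
  obtain ⟨hl, hrl, h3⟩ := transform_ainv grid hPre
  have hBlen : (transform_alt grid).length = grid.length := by
    simp [transform_alt, PySem.List.length_enumerate]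
  apply List.ext_getElem (by rw [hl, hBlen])
  intro r h1 h2
  have hr : r < grid.length := by omega
  have hrow_alt : (transform_alt grid)[r]'h2 =
      (PySem.List.enumerate (grid[r]'hr)).map (fun cv =>
        if cv.2 == 0 && pvBecomesOne grid ↑grid.length ↑(grid.getD 0 []).length (0 + ↑r) cv.1
        then 1 else cv.2) := by
    simp [transform_alt, List.getElem_map, PySem.List.getElem_enumerate,
      PySem.List.pyGetD_zero]
  have hArowlen : ((transform grid)[r]'h1).length = (grid[r]'hr).length := by
    rw [← getD_eq_getElem_row _ r h1, ← getD_eq_getElem_row _ r hr]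
    exact hrl r
  apply List.ext_getElem
  · rw [hrow_alt, hArowlen]
    simp [PySem.List.length_enumerate]
  intro c hc1 hc2
  have hc : c < (grid[r]'hr).length := by omega
  have hBentry : ((transform_alt grid)[r]'h2)[c]'hc2 =
      (if (grid[r]'hr)[c]'hc == 0 &&
          pvBecomesOne grid ↑grid.length ↑(grid.getD 0 []).length ↑r ↑c
       then 1 else (grid[r]'hr)[c]'hc) := by
    rw [List.getElem_of_eq hrow_alt hc2, List.getElem_map]
    simp [PySem.List.getElem_enumerate]
  have hAentry : ((transform grid)[r]'h1)[c]'hc1 = cellN (transform grid) r c := by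
    rw [cellN_eq_getElem _ r c (by omega) (by omega)]
  have horig : cellN grid r c = (grid[r]'hr)[c]'hc := cellN_eq_getElem _ r c hr hc
  rw [hBentry, hAentry]
  by_cases hC : cellN grid r c = 0 ∧
      trigD grid (winList grid.length (grid.getD 0 []).length) r c
  · rw [(h3 r c).1 hC]
    have hb : pvBecomesOne grid ↑grid.length ↑(grid.getD 0 []).length ↑r ↑c = true :=
      (becomesOne_iff grid _ _ r c).2 ((trig_winList_iff grid _ _ r c).1 hC.2)
    rw [hb, ← horig, hC.1]
    simp
  · rw [(h3 r c).2 hC, ← horig]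
    rcases Classical.em (cellN grid r c = 0) with h0 | h0
    · have hnt : ¬ trigD grid (winList grid.length (grid.getD 0 []).length) r c :=
        fun ht => hC ⟨h0, ht⟩
      have hb : pvBecomesOne grid ↑grid.length ↑(grid.getD 0 []).length ↑r ↑c = false := by
        rcases Bool.eq_false_or_eq_true
          (pvBecomesOne grid ↑grid.length ↑(grid.getD 0 []).length ↑r ↑c) with hb | hb
        · exact absurd ((trig_winList_iff grid _ _ r c).2
            ((becomesOne_iff grid _ _ r c).1 hb)) hnt
        · exact hb
      rw [hb]
      simp
    · have hb : (cellN grid r c == 0) = false := by simpa using h0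
      rw [hb]
      simp
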